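-- pv_equiv track=rewrite | github.com/donghyuun/-Algorithm | programmers/level1/콜라 문제.py | solution
-- ===== SOURCE A (Python) =====
-- def solution(a, b, n):
--     answer = 0
--     while n >= a:
--         cock=(n//a)*b # 빈병 n개로부터 콜라 cock 개 얻음
--         answer+=cock # 콜라 얻은 개수 누적합에 추가
--         emt=n%a # 사용되지 못한 빈병 개수
--         n = cock+emt # 콜라 마시고 다시 빈병 만들어진것 기존 빈병에 추가
--     return answer
-- ===== SOURCE B (Python) =====
-- def solution(a, b, n):
--     # Closed form: each exchange turns a bottles into b, so the total number of
--     # exchanged bottle-groups while n >= a is (n - b) // (a - b).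
--     if n < a:
--         return 0
--     return ((n - b) // (a - b)) * b
-- ===== Notes on version B (the rewrite author's own statement) =====
-- stated objective: simpler
-- what changed: Replaced the iterative exchange loop by the closed-form formula ((n-b)//(a-b))*b; Pre_ excludes n>=a with a<=0 (division by zero / divergence), b>=a (divergence) and b<0 (negative cokes per exchange is outside the task's natural domain; A's value there is an artefact of one loop iteration).
-- outside the precondition, e.g. on solution(3, -1, 10): A returns -3, B returns -2
import Mathlib
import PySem

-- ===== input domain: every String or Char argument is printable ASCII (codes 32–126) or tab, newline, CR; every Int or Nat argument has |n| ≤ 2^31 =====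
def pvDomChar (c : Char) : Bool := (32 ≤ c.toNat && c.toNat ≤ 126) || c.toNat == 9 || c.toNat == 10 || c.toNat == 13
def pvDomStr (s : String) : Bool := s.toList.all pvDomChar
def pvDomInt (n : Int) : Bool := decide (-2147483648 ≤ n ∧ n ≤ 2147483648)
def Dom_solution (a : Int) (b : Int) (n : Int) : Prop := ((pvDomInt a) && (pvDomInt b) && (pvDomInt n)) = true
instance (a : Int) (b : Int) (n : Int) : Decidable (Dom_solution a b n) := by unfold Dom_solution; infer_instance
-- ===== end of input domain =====

-- B replaces A's exchange loop by the closed-form formula ((n-b)//(a-b))*b.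

-- ===== PORT A =====
-- A's while-loop, with fuel only to make it total in Lean; inside Pre_ the loop
-- runs at most n.toNat times (n strictly decreases), so the fuel never runs out.
def solutionLoop (fuel : Nat) (a b n answer : Int) : Int :=
  match fuel with
  | 0 => answer
  | f + 1 =>
    if a ≤ n then
      let cock := (PySem.Int.floordiv n a) * b
      solutionLoop f a b (cock + PySem.Int.mod n a) (answer + cock)
    else answer

def solution (a : Int) (b : Int) (n : Int) : Int :=
  solutionLoop (n.toNat + 1) a b n 0

-- ===== PORT B =====
def solution_alt (a : Int) (b : Int) (n : Int) : Int :=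
  if n < a then 0
  else (PySem.Int.floordiv (n - b) (a - b)) * b

-- ===== PRECONDITION & SPEC =====
-- Pre_ excludes only inputs with n ≥ a and (a ≤ 0, b ≥ a, or b < 0): with a = 0 A
-- divides by zero, with b ≥ a (and most a < 0 cases) A loops forever, and b < 0
-- (a negative coke reward per exchange) is outside the task's natural domain,
-- where A's returned value is an artefact of a single loop iteration.
def Pre_solution (a : Int) (b : Int) (n : Int) : Prop := (1 ≤ a ∧ 0 ≤ b ∧ b < a) ∨ n < a
instance (a : Int) (b : Int) (n : Int) : Decidable (Pre_solution a b n) := by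
  unfold Pre_solution; infer_instance

def pvWitness_solution : Int × Int × Int := (3, 1, 10)

def Spec_solution (a : Int) (b : Int) (n : Int) (out : Int) : Prop := out = solution_alt a b n
instance (a : Int) (b : Int) (n : Int) (out : Int) : Decidable (Spec_solution a b n out) := by
  unfold Spec_solution; infer_instance

-- ===== CLAIM (what is proved, stated in full; the proofs are below) =====
def Claim_equal_solution : Prop := ∀ (a : Int) (b : Int) (n : Int),
  Dom_solution a b n → Pre_solution a b n → Spec_solution a b n (solution a b n)

-- ===== LEMMAS AND PROOFS =====

-- The loop invariant: with 1 ≤ a, 0 ≤ b < a and enough fuel, the loop adds exactly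
-- B's closed-form value to the accumulator.
theorem solutionLoop_closed (fuel : Nat) :
    ∀ (a b n answer : Int), 1 ≤ a → 0 ≤ b → b < a → n.toNat < fuel →
      solutionLoop fuel a b n answer = answer + solution_alt a b n := by
  induction fuel with
  | zero => intro a b n answer _ _ _ h; omega
  | succ f ih =>
    intro a b n answer ha hb0 hb hfuel
    by_cases hn : a ≤ n
    · have hq : 1 ≤ PySem.Int.floordiv n a := by
        rw [PySem.Int.le_floordiv_iff_mul_le (by omega)]; omega
      have hid := PySem.Int.floordiv_mul_add_mod n a
      have hm0 : 0 ≤ PySem.Int.mod n a := PySem.Int.mod_nonneg n (by omega)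
      have hml : PySem.Int.mod n a < a := PySem.Int.mod_lt n (by omega)
      set q := PySem.Int.floordiv n a with hqdef
      have hn' : q * b + PySem.Int.mod n a < n := by nlinarith
      simp only [solutionLoop, if_pos hn]
      rw [ih a b (q * b + PySem.Int.mod n a) (answer + q * b) ha hb0 hb (by omega)]
      have hab : 1 ≤ a - b := by omega
      have hge : b ≤ q * b + PySem.Int.mod n a := by nlinarith
      -- telescoping identity for the exchange count (n-b)//(a-b)
      have key : PySem.Int.floordiv (n - b) (a - b)
          = q + PySem.Int.floordiv (q * b + PySem.Int.mod n a - b) (a - b) := by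
        rw [PySem.Int.floordiv_eq_iff_of_pos (show (0:Int) < a - b by omega)]
        set r := PySem.Int.floordiv (q * b + PySem.Int.mod n a - b) (a - b) with hrdef
        have hr := PySem.Int.floordiv_mul_add_mod (q * b + PySem.Int.mod n a - b) (a - b)
        have hrm0 : 0 ≤ PySem.Int.mod (q * b + PySem.Int.mod n a - b) (a - b) :=
          PySem.Int.mod_nonneg _ (by omega)
        have hrml : PySem.Int.mod (q * b + PySem.Int.mod n a - b) (a - b) < a - b :=
          PySem.Int.mod_lt _ (by omega)
        constructor <;> nlinarith
      by_cases hn2 : q * b + PySem.Int.mod n a < a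
      · -- next state leaves the loop; its closed form there is 0
        have : PySem.Int.floordiv (q * b + PySem.Int.mod n a - b) (a - b) = 0 := by
          rw [PySem.Int.floordiv_eq_iff_of_pos (show (0:Int) < a - b by omega)]; omega
        simp only [solution_alt, if_pos hn2, if_neg (by omega : ¬ n < a)]
        rw [key, this]; ring
      · simp only [solution_alt, if_neg (by omega : ¬ n < a),
          if_neg (by omega : ¬ q * b + PySem.Int.mod n a < a)]
        rw [key]; ring
    · simp only [solutionLoop, if_neg hn, solution_alt, if_pos (by omega : n < a)]; ring

-- ===== VERDICT (by name: the statement is the Claim_ definition above) =====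
theorem solution_spec : Claim_equal_solution := by
  intro a b n _ hpre
  rcases hpre with ⟨ha, hb0, hb⟩ | hn
  · show solution a b n = solution_alt a b n
    unfold solution
    rw [solutionLoop_closed _ a b n 0 ha hb0 hb (by omega)]
    ring
  · show solution a b n = solution_alt a b n
    unfold solution solutionLoop
    rw [if_neg (by omega : ¬ a ≤ n)]
    simp only [solution_alt, if_pos hn]
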